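-- pv_equiv track=rewrite | github.com/Azilaslam/profanity-filter-api | main.py | find_alpha_runs
-- ===== SOURCE A (Python) =====
-- def find_alpha_runs(word: str):
--     runs = []
--     i = 0
--     while i < len(word):
--         if not word[i].isalpha():
--             i += 1
--             continue
--         j = i + 1
--         while j < len(word) and word[j].lower() == word[i].lower():
--             j += 1
--         runs.append((i, j - i, word[i]))
--         i = j
--     return runs
-- ===== SOURCE B (Python) =====
-- def find_alpha_runs(word: str):
--     runs = []
--     start = None  # index where the current run began, or None
--     for idx, ch in enumerate(word):
--         if start is not None and ch.lower() == word[start].lower():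
--             continue  # still inside the current run
--         if start is not None:
--             runs.append((start, idx - start, word[start]))
--         start = idx if ch.isalpha() else None
--     if start is not None:
--         runs.append((start, len(word) - start, word[start]))
--     return runs
-- ===== Notes on version B (the rewrite author's own statement) =====
-- stated objective: alternative
-- what changed: Replaced the nested while loops (outer skip + inner rescan with manual index jumps) by a single flat for-loop over enumerate(word) maintaining a run-start state with an end-of-string flush.
import Mathlib
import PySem

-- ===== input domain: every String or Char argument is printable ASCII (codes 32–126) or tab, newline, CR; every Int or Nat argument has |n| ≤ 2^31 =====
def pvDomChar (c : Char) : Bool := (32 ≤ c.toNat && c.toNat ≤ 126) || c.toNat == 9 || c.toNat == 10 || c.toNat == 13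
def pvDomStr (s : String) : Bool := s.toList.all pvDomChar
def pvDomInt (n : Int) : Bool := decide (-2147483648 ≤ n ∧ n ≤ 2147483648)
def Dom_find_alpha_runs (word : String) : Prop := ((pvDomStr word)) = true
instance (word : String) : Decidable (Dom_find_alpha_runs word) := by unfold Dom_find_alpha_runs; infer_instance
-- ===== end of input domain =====

-- B restructures A's nested while loops into one flat pass with run-start state; same values, same cost (objective: alternative).

-- ===== PORT A =====
-- inner 'while j < len(word) and word[j].lower() == word[i].lower(): j += 1' : number of extra matching chars
def pvRunLen (low : Char) : List Char → Nat
  | [] => 0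
  | c :: rest => if PySem.Chars.lowerChar c = low then pvRunLen low rest + 1 else 0

-- outer while over the remaining suffix, i = absolute index of its head
def find_alpha_runs_go (cs : List Char) (i : Int) : List (Int × Int × String) :=
  match cs with
  | [] => []
  | c :: rest =>
    if ¬ (PySem.Chars.isalpha c) then
      find_alpha_runs_go rest (i + 1)
    else
      (i, (pvRunLen (PySem.Chars.lowerChar c) rest : Int) + 1, String.ofList [c]) ::
        find_alpha_runs_go (rest.drop (pvRunLen (PySem.Chars.lowerChar c) rest))
          (i + ((pvRunLen (PySem.Chars.lowerChar c) rest : Int) + 1))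
termination_by cs.length
decreasing_by
  all_goals simp

def find_alpha_runs (word : String) : List (Int × Int × String) :=
  find_alpha_runs_go word.toList 0

-- ===== PORT B =====
-- the for-loop over enumerate(word); st = current run (start index, word[start]); flush at end uses len(word)
def find_alpha_runs_bgo (flushLen : Int) (ps : List (Int × Char)) (st : Option (Int × Char)) :
    List (Int × Int × String) :=
  match ps with
  | [] =>
    match st with
    | some (s, sc) => [(s, flushLen - s, String.ofList [sc])]
    | none => []
  | (idx, ch) :: rest =>
    match st with
    | some (s, sc) =>
      if PySem.Chars.lowerChar ch = PySem.Chars.lowerChar sc then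
        find_alpha_runs_bgo flushLen rest (some (s, sc))
      else
        (s, idx - s, String.ofList [sc]) ::
          find_alpha_runs_bgo flushLen rest
            (if PySem.Chars.isalpha ch then some (idx, ch) else none)
    | none =>
      find_alpha_runs_bgo flushLen rest
        (if PySem.Chars.isalpha ch then some (idx, ch) else none)

def find_alpha_runs_alt (word : String) : List (Int × Int × String) :=
  find_alpha_runs_bgo (word.toList.length : Int) (PySem.List.enumerate word.toList 0) none

-- ===== PRECONDITION & SPEC =====
def Spec_find_alpha_runs (word : String) (out : List (Int × Int × String)) : Prop := out = find_alpha_runs_alt word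
instance (word : String) (out : List (Int × Int × String)) : Decidable (Spec_find_alpha_runs word out) := by unfold Spec_find_alpha_runs; infer_instance

-- ===== CLAIM (what is proved, stated in full; the proofs are below) =====
def Claim_equal_find_alpha_runs : Prop := ∀ (word : String), Dom_find_alpha_runs word → Spec_find_alpha_runs word (find_alpha_runs word)

-- ===== LEMMAS AND PROOFS =====

theorem pvRunLen_le (low : Char) (cs : List Char) : pvRunLen low cs ≤ cs.length := by
  induction cs with
  | nil => simp [pvRunLen]
  | cons c rest ih => simp only [pvRunLen]; split <;> simp <;> omega

-- in-run state: B flushes exactly where A's inner scan stops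
theorem bgo_some (cs : List Char) : ∀ (i s : Int) (sc : Char) (L : Int),
    L = i + (cs.length : Int) →
    find_alpha_runs_bgo L (PySem.List.enumerate cs i) (some (s, sc)) =
      (s, i + (pvRunLen (PySem.Chars.lowerChar sc) cs : Int) - s, String.ofList [sc]) ::
        find_alpha_runs_bgo L
          (PySem.List.enumerate (cs.drop (pvRunLen (PySem.Chars.lowerChar sc) cs))
            (i + (pvRunLen (PySem.Chars.lowerChar sc) cs : Int))) none := by
  induction cs with
  | nil =>
    intro i s sc L hL
    simp [PySem.List.enumerate, find_alpha_runs_bgo, pvRunLen, hL]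
  | cons c rest ih =>
    intro i s sc L hL
    rw [PySem.List.enumerate_cons]
    by_cases h : PySem.Chars.lowerChar c = PySem.Chars.lowerChar sc
    · rw [find_alpha_runs_bgo]
      simp only [h, if_pos]
      rw [ih (i + 1) s sc L (by simp at hL ⊢; omega)]
      simp only [pvRunLen, if_pos h]
      have hpush : (i + 1) + (pvRunLen (PySem.Chars.lowerChar sc) rest : Int)
          = i + ((pvRunLen (PySem.Chars.lowerChar sc) rest + 1 : Nat) : Int) := by push_cast; ring
      rw [hpush]
      rfl
    · simp only [pvRunLen, if_neg h, List.drop_zero]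
      rw [find_alpha_runs_bgo]
      simp only [if_neg h]
      rw [PySem.List.enumerate_cons, find_alpha_runs_bgo]
      norm_num

-- main invariant: outside a run, B's loop equals A's outer loop on the same suffix
theorem bgo_none (n : Nat) : ∀ (cs : List Char), cs.length ≤ n → ∀ (i L : Int),
    L = i + (cs.length : Int) →
    find_alpha_runs_bgo L (PySem.List.enumerate cs i) none = find_alpha_runs_go cs i := by
  induction n with
  | zero =>
    intro cs hn i L hL
    have : cs = [] := List.length_eq_zero_iff.mp (Nat.le_zero.mp hn)
    subst this
    simp [PySem.List.enumerate, find_alpha_runs_bgo]; rw [find_alpha_runs_go.eq_def]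
  | succ n ih =>
    intro cs hn i L hL
    cases cs with
    | nil => simp [PySem.List.enumerate, find_alpha_runs_bgo]; rw [find_alpha_runs_go.eq_def]
    | cons c rest =>
      rw [PySem.List.enumerate_cons, find_alpha_runs_bgo, find_alpha_runs_go.eq_def]
      dsimp only
      by_cases ha : PySem.Chars.isalpha c
      · rw [if_pos ha, if_neg (show ¬(¬PySem.Chars.isalpha c = true) by simp [ha])]
        rw [bgo_some rest (i + 1) i c L (by simp at hL ⊢; omega)]
        set k := pvRunLen (PySem.Chars.lowerChar c) rest with hk
        have hkle : k ≤ rest.length := pvRunLen_le _ _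
        have h1 : (i + 1) + (k : Int) - i = (k : Int) + 1 := by ring
        have h2 : (i + 1) + (k : Int) = i + ((k : Int) + 1) := by ring
        rw [h1, h2]
        congr 1
        rw [ih (rest.drop k) (by simp at hn ⊢; omega) (i + ((k : Int) + 1)) L
          (by simp at hL ⊢; omega)]
      · rw [if_neg ha, if_pos (by simp [ha])]
        exact ih rest (by simp at hn; omega) (i + 1) L (by simp at hL ⊢; omega)

-- ===== VERDICT (by name: the statement is the Claim_ definition above) =====
theorem find_alpha_runs_spec : Claim_equal_find_alpha_runs := by
  intro word _
  unfold Spec_find_alpha_runs find_alpha_runs find_alpha_runs_alt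
  exact (bgo_none word.toList.length word.toList le_rfl 0 _ (by simp)).symm
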